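-- pv_equiv track=rewrite | github.com/ariannamethod/molequla | molecule.py | extract_candidate_sentences_from_messages
-- ===== SOURCE A (Python) =====
-- def normalize_text(s: str) -> str:
--     s = s.replace("\r", " ").replace("\t", " ")
--     return " ".join(s.split())
--
-- def extract_candidate_sentences_from_messages(msgs):
--     """
--     Turn recent chat into training sentences.
--     Key trick: KEEP the role marker (H:/A:) so the organism learns dialogue,
--     but keep it short so the prompt format doesn't swallow the model.
--     """
--     out = []
--     for role, text in msgs:
--         t = normalize_text(text)
--         if not t:
--             continue
--
--         tag = "H:" if role == "user" else "A:"
--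
--         buf = ""
--         for ch in t:
--             buf += ch
--             if ch in ".!?":
--                 s = buf.strip()
--                 if len(s) >= 6:
--                     out.append(f"{tag} {s}")
--                 buf = ""
--         s = buf.strip()
--         if len(s) >= 12:
--             out.append(f"{tag} {s}")
--
--     # stable dedup (case-insensitive)
--     seen = set()
--     uniq = []
--     for s in out:
--         k = s.lower()
--         if k not in seen:
--             seen.add(k)
--             uniq.append(s)
--     return uniq
-- ===== SOURCE B (Python) =====
-- def normalize_text(s: str) -> str:
--     s = s.replace("\r", " ").replace("\t", " ")
--     return " ".join(s.split())
--
--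
-- def sentence_chunks(t):
--     """Split t into punctuation-terminated chunks (delimiter kept) plus the remainder."""
--     chunks = []
--     while True:
--         cut = next((i for i, ch in enumerate(t) if ch in ".!?"), None)
--         if cut is None:
--             return chunks, t
--         chunks.append(t[:cut + 1])
--         t = t[cut + 1:]
--
--
-- def extract_candidate_sentences_from_messages(msgs):
--     """
--     Tokenize each message into sentence chunks up front (find-next-delimiter and
--     slice), then tag and filter; dedup via an insertion-ordered dict keyed by
--     the lowered sentence.
--     """
--     out = []
--     for role, text in msgs:
--         t = normalize_text(text)
--         if not t:
--             continue
--         tag = "H:" if role == "user" else "A:"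
--         chunks, rest = sentence_chunks(t)
--         for c in chunks:
--             s = c.strip()
--             if len(s) >= 6:
--                 out.append(f"{tag} {s}")
--         s = rest.strip()
--         if len(s) >= 12:
--             out.append(f"{tag} {s}")
--
--     uniq = {}
--     for s in out:
--         uniq.setdefault(s.lower(), s)
--     return list(uniq.values())
-- ===== Notes on version B (the rewrite author's own statement) =====
-- stated objective: alternative
-- what changed: A accumulates a character buffer and emits each sentence inline the moment a delimiter is hit; B first tokenizes each message into delimiter-terminated chunks plus a remainder by repeated find-next-delimiter-and-slice, then tags and filters them in a separate pass, and the set-plus-parallel-list dedup becomes a single insertion-ordered dict keyed by the lowered sentence.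
import Mathlib
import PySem

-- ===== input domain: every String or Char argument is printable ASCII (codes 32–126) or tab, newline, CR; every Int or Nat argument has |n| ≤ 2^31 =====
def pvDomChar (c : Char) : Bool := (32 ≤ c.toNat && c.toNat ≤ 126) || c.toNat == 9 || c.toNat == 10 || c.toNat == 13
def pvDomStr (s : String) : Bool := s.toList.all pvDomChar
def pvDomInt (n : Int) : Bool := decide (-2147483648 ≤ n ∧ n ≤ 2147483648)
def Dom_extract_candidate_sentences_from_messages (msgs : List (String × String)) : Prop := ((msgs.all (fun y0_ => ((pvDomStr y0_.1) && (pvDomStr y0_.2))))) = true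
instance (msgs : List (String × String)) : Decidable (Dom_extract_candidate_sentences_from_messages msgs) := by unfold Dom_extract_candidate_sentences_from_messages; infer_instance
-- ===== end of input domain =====

-- B tokenizes each message into sentence chunks up front (find-next-delimiter and slice)
-- instead of A's emit-as-you-go character buffer, and dedups via an insertion-ordered dict;
-- objective: alternative (same cost, different decomposition).

-- ===== PORT A =====
-- shared same-module helper (identical in Source A and Source B)
def normalize_text (s : String) : String :=
  PySem.Str.join " " (PySem.Str.split₀ (PySem.Str.replace (PySem.Str.replace s "\r" " ") "\t" " "))

-- Python `ch in ".!?"` on a single character = membership among these three chars (exact)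
def pvDelim (ch : Char) : Bool := ch = '.' || ch = '!' || ch = '?'

-- f"{tag} {s}" where tag and s are kept as char lists (String.ofList at the boundary; exact)
def pvSent (tag s : List Char) : String := String.ofList (tag ++ ' ' :: s)

-- body of A's `for ch in t` loop; state = (buf, out)
def pvEmitA (tag : List Char) (st : List Char × List String) (ch : Char) :
    List Char × List String :=
  let buf := st.1 ++ [ch]
  if pvDelim ch then
    let s := PySem.Chars.strip buf
    if 6 ≤ s.length then ([], st.2 ++ [pvSent tag s]) else ([], st.2)
  else (buf, st.2)

-- body of A's `for role, text in msgs` loop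
def pvMsgA (out : List String) (m : String × String) : List String :=
  let t := (normalize_text m.2).toList
  if t = [] then out
  else
    let tag := (if m.1 = "user" then "H:" else "A:").toList
    let st := t.foldl (pvEmitA tag) ([], out)
    let s := PySem.Chars.strip st.1
    if 12 ≤ s.length then st.2 ++ [pvSent tag s] else st.2

-- A's stable case-insensitive dedup: a set of lowered keys plus a parallel list
def pvDedupA (l : List String) : List String :=
  (l.foldl
    (fun st s =>
      let k := PySem.Str.lower s
      if PySem.Set.contains st.1 k then st else (PySem.Set.add st.1 k, st.2 ++ [s]))
    ((PySem.Set.empty : PySem.Set String), ([] : List String))).2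

def extract_candidate_sentences_from_messages (msgs : List (String × String)) : List String :=
  pvDedupA (msgs.foldl pvMsgA [])

-- ===== PORT B =====
-- Source B's sentence_chunks: repeatedly find the next delimiter and slice the chunk off;
-- `next((i for i, ch in enumerate(t) if ch in ".!?"), None)` = first index satisfying pvDelim
def pvChunksB (t : List Char) : List (List Char) × List Char :=
  match h : t.findIdx? pvDelim with
  | none => ([], t)
  | some i =>
    let r := pvChunksB (t.drop (i + 1))
    ((t.take (i + 1)) :: r.1, r.2)
termination_by t.length
decreasing_by
  cases t with
  | nil => simp at h
  | cons c cs => simp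

-- body of B's `for role, text in msgs` loop
def pvMsgB (out : List String) (m : String × String) : List String :=
  let t := (normalize_text m.2).toList
  if t = [] then out
  else
    let tag := (if m.1 = "user" then "H:" else "A:").toList
    let cr := pvChunksB t
    let out' := cr.1.foldl
      (fun o c =>
        let s := PySem.Chars.strip c
        if 6 ≤ s.length then o ++ [pvSent tag s] else o) out
    let s := PySem.Chars.strip cr.2
    if 12 ≤ s.length then out' ++ [pvSent tag s] else out'

-- B's dedup: insertion-ordered dict keyed by the lowered sentence
def pvDedupB (l : List String) : List String :=
  (l.foldl (fun d s => PySem.Dict.setdefault d (PySem.Str.lower s) s)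
    (PySem.Dict.empty : PySem.Dict String String)).values

def extract_candidate_sentences_from_messages_alt (msgs : List (String × String)) : List String :=
  pvDedupB (msgs.foldl pvMsgB [])

-- ===== PRECONDITION & SPEC =====
def Spec_extract_candidate_sentences_from_messages (msgs : List (String × String)) (out : List String) : Prop := out = extract_candidate_sentences_from_messages_alt msgs
instance (msgs : List (String × String)) (out : List String) : Decidable (Spec_extract_candidate_sentences_from_messages msgs out) := by unfold Spec_extract_candidate_sentences_from_messages; infer_instance

-- ===== CLAIM (what is proved, stated in full; the proofs are below) =====
def Claim_equal_extract_candidate_sentences_from_messages : Prop := ∀ (msgs : List (String × String)), Dom_extract_candidate_sentences_from_messages msgs → Spec_extract_candidate_sentences_from_messages msgs (extract_candidate_sentences_from_messages msgs)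

-- ===== LEMMAS AND PROOFS =====

-- canonical decomposition of a char list into delimiter-terminated chunks and a tail
def pvSegs : List Char → List (List Char) × List Char
  | [] => ([], [])
  | c :: cs =>
    let r := pvSegs cs
    if pvDelim c then ([c] :: r.1, r.2)
    else
      match r.1 with
      | [] => ([], c :: r.2)
      | p :: ps => ((c :: p) :: ps, r.2)

-- prepend a pending buffer to the first chunk (or to the tail if there is no chunk)
def pvAug (buf : List Char) (r : List (List Char) × List Char) : List (List Char) × List Char :=
  match r.1 with
  | [] => ([], buf ++ r.2)
  | p :: ps => ((buf ++ p) :: ps, r.2)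

def pvEmit6 (tag : List Char) (c : List Char) : Option String :=
  let s := PySem.Chars.strip c
  if 6 ≤ s.length then some (pvSent tag s) else none

theorem pvAug_nil (r : List (List Char) × List Char) : pvAug [] r = r := by
  obtain ⟨l, tl⟩ := r; cases l <;> simp [pvAug]

theorem pvFoldA (tag : List Char) :
    ∀ (cs buf : List Char) (out : List String),
      cs.foldl (pvEmitA tag) (buf, out) =
        ((pvAug buf (pvSegs cs)).2, out ++ ((pvAug buf (pvSegs cs)).1).filterMap (pvEmit6 tag)) := by
  intro cs
  induction cs with
  | nil => intro buf out; simp [pvSegs, pvAug]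
  | cons c cs ih =>
    intro buf out
    by_cases hd : pvDelim c
    · by_cases h6 : 6 ≤ (PySem.Chars.strip (buf ++ [c])).length <;>
        · simp only [List.foldl_cons, pvEmitA, hd, if_true, h6, if_false, ih,
            pvSegs, pvAug, List.filterMap_cons]
          rcases h : (pvSegs cs).1 with _ | ⟨p, ps⟩ <;> simp [h6, pvEmit6]
    · have haug : pvAug buf (pvSegs (c :: cs)) = pvAug (buf ++ [c]) (pvSegs cs) := by
        simp only [pvSegs, hd, if_false, Bool.false_eq_true]
        rcases h : (pvSegs cs).1 with _ | ⟨p, ps⟩ <;> simp [pvAug, h]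
      simp only [List.foldl_cons, pvEmitA, hd, ih, haug]
      simp

-- no delimiter anywhere: everything is tail
theorem pvSegs_none : ∀ t : List Char, t.findIdx? pvDelim = none → pvSegs t = ([], t) := by
  intro t
  induction t with
  | nil => intro _; rfl
  | cons c cs ih =>
    intro h
    have hd : pvDelim c = false := by
      cases hd : pvDelim c
      · rfl
      · rw [List.findIdx?_cons, hd] at h; simp at h
    have hcs : cs.findIdx? pvDelim = none := by
      rw [List.findIdx?_cons, hd] at h; simpa using h
    simp [pvSegs, hd, ih hcs]

-- first delimiter at index i: the first chunk is take (i+1), the rest splits drop (i+1)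
theorem pvSegs_some : ∀ (t : List Char) (i : Nat), t.findIdx? pvDelim = some i →
    pvSegs t = ((t.take (i + 1)) :: (pvSegs (t.drop (i + 1))).1, (pvSegs (t.drop (i + 1))).2) := by
  intro t
  induction t with
  | nil => intro i h; simp at h
  | cons c cs ih =>
    intro i h
    rw [List.findIdx?_cons] at h
    by_cases hd : pvDelim c
    · simp [hd] at h
      subst h
      simp [pvSegs, hd]
    · simp [hd] at h
      cases hh : cs.findIdx? pvDelim with
      | none => rw [hh] at h; simp at h
      | some j =>
        rw [hh] at h; simp at h
        obtain rfl : i = j + 1 := by omega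
        have := ih j hh
        simp [pvSegs, hd, this]

theorem pvChunksB_eq : ∀ t : List Char, pvChunksB t = pvSegs t := by
  intro t
  induction t using pvChunksB.induct with
  | case1 t h => rw [pvChunksB, h, pvSegs_none t h]
  | case2 t i h ih =>
    rw [pvChunksB, h]
    show ((t.take (i + 1)) :: (pvChunksB (t.drop (i + 1))).1,
        (pvChunksB (t.drop (i + 1))).2) = pvSegs t
    rw [ih, pvSegs_some t i h]

-- B's per-chunk emission loop appends exactly the pvEmit6 hits
theorem pvChunkLoop (tag : List Char) :
    ∀ (l : List (List Char)) (o : List String),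
      l.foldl
        (fun o c =>
          let s := PySem.Chars.strip c
          if 6 ≤ s.length then o ++ [pvSent tag s] else o) o =
        o ++ l.filterMap (pvEmit6 tag) := by
  intro l
  induction l with
  | nil => intro o; simp
  | cons c l ihl =>
    intro o
    by_cases h6 : 6 ≤ (PySem.Chars.strip c).length <;> simp [ihl, h6, pvEmit6]

theorem pvMsg_eq (out : List String) (m : String × String) : pvMsgA out m = pvMsgB out m := by
  unfold pvMsgA pvMsgB
  by_cases ht : (normalize_text m.2).toList = []
  · simp [ht]
  · simp only [ht, if_false, pvFoldA, pvAug_nil, pvChunksB_eq, pvChunkLoop]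

-- the two dedup loops agree: A's (seen, uniq) pair is exactly (keys, values) of B's dict
theorem pvDedup_loop :
    ∀ (l : List String) (d : PySem.Dict String String), d.keys.Nodup →
      l.foldl
        (fun st s =>
          let k := PySem.Str.lower s
          if PySem.Set.contains st.1 k then st else (PySem.Set.add st.1 k, st.2 ++ [s]))
        (d.keys, d.values) =
      ((l.foldl (fun d s => PySem.Dict.setdefault d (PySem.Str.lower s) s) d).keys,
       (l.foldl (fun d s => PySem.Dict.setdefault d (PySem.Str.lower s) s) d).values) := by
  intro l
  induction l with
  | nil => intro d _; simp
  | cons s l ih =>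
    intro d hnd
    by_cases hc : d.contains (PySem.Str.lower s) = true
    · have hmem : PySem.Str.lower s ∈ d.keys := (PySem.Dict.contains_iff_mem_keys d _).mp hc
      have hset : PySem.Set.contains d.keys (PySem.Str.lower s) = true :=
        (PySem.Set.contains_iff d.keys _).mpr hmem
      simp only [List.foldl_cons, hset, if_true, PySem.Dict.setdefault_of_contains d s hc]
      exact ih d hnd
    · have hc' : d.contains (PySem.Str.lower s) = false := by
        cases h : d.contains (PySem.Str.lower s) with
        | false => rfl
        | true => exact absurd h hc
      have hmem : PySem.Str.lower s ∉ d.keys := fun h =>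
        hc ((PySem.Dict.contains_iff_mem_keys d _).mpr h)
      have hset : PySem.Set.contains d.keys (PySem.Str.lower s) = false := by
        cases h : PySem.Set.contains d.keys (PySem.Str.lower s) with
        | false => rfl
        | true => exact absurd ((PySem.Set.contains_iff d.keys _).mp h) hmem
      have hitems := PySem.Dict.items_insert_of_not_contains d s hc'
      have hkeys : (d.insert (PySem.Str.lower s) s).keys = d.keys ++ [PySem.Str.lower s] :=
        PySem.Dict.keys_insert_of_not_contains d s hc'
      have hvals : (d.insert (PySem.Str.lower s) s).values = d.values ++ [s] := by
        simp [PySem.Dict.values, hitems]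
      have hadd : PySem.Set.add d.keys (PySem.Str.lower s) = d.keys ++ [PySem.Str.lower s] :=
        PySem.Set.add_of_not_mem hmem
      simp only [List.foldl_cons, hset, Bool.false_eq_true, if_false, hadd,
        PySem.Dict.setdefault_of_not_contains d s hc', ← hkeys, ← hvals]
      exact ih _ (PySem.Dict.nodup_keys_insert d _ s hnd)

theorem pvDedup_eq (l : List String) : pvDedupA l = pvDedupB l := by
  unfold pvDedupA pvDedupB
  have h := pvDedup_loop l PySem.Dict.empty (by simp)
  have hk : (PySem.Dict.empty : PySem.Dict String String).keys = ([] : List String) := by rfl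
  have hv : (PySem.Dict.empty : PySem.Dict String String).values = ([] : List String) := by rfl
  rw [hk, hv] at h
  have : (PySem.Set.empty : PySem.Set String) = ([] : List String) := rfl
  rw [this, h]

-- ===== VERDICT (by name: the statement is the Claim_ definition above) =====
theorem extract_candidate_sentences_from_messages_spec : Claim_equal_extract_candidate_sentences_from_messages := by
  intro msgs _
  unfold Spec_extract_candidate_sentences_from_messages
  unfold extract_candidate_sentences_from_messages extract_candidate_sentences_from_messages_alt
  have hfun : pvMsgA = pvMsgB := by
    funext out m; exact pvMsg_eq out m
  rw [hfun, pvDedup_eq]
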